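-- pv_equiv track=rewrite | github.com/erdalcakiroglu/SpStudioPro-v2 | app/ui/views/blocking_view.py | _calculate_levels
-- ===== SOURCE A (Python) =====
-- from typing import Optional, List, Dict
--
-- def _calculate_levels(all_sessions: set, edges: list, head_blocker_ids: set) -> Dict[int, set]:
--     """Calculate tree levels for sessions"""
--     levels = {}
--
--     # Head blockers are level 0
--     levels[0] = head_blocker_ids.copy() if head_blocker_ids else set()
--
--     # Build adjacency for blocked sessions
--     blocking_map = {}  # blocker -> [blocked]
--     for blocker_id, blocked_id, _ in edges:
--         if blocker_id not in blocking_map: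
--             blocking_map[blocker_id] = []
--         blocking_map[blocker_id].append(blocked_id)
--
--     # BFS to assign levels
--     assigned = set(levels[0])
--     current_level = 0
--
--     while len(assigned) < len(all_sessions):
--         current_level += 1
--         levels[current_level] = set()
--
--         for sid in levels[current_level - 1]:
--             if sid in blocking_map:
--                 for blocked_id in blocking_map[sid]:
--                     if blocked_id not in assigned:
--                         levels[current_level].add(blocked_id)
--                         assigned.add(blocked_id)
--
--         # Safety: add any remaining sessions
--         if not levels[current_level]:
--             for sid in all_sessions - assigned:
--                 levels[current_level].add(sid)
--                 assigned.add(sid)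
--             break
--
--     return levels
-- ===== SOURCE B (Python) =====
-- def _calculate_levels(all_sessions: set, edges: list, head_blocker_ids: set):
--     """Single-queue BFS tagging each discovered session with its depth, then
--     emitting depth buckets until every session is accounted for."""
--     adj = {}
--     for blocker_id, blocked_id, _ in edges:
--         adj.setdefault(blocker_id, []).append(blocked_id)
--
--     # BFS over (session, depth) pairs; bucket the sessions by depth.
--     buckets = {0: set(head_blocker_ids)}
--     seen = set(head_blocker_ids)
--     queue = [(sid, 0) for sid in head_blocker_ids]
--     i = 0
--     while i < len(queue):
--         sid, d = queue[i]
--         i += 1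
--         for child in adj.get(sid, ()):
--             if child not in seen:
--                 seen.add(child)
--                 buckets.setdefault(d + 1, set()).add(child)
--                 queue.append((child, d + 1))
--
--     # Emit the buckets in depth order until the session count is covered;
--     # any sessions the BFS never reached form one final level.
--     total = len(all_sessions)
--     levels = {0: buckets[0]}
--     count = len(buckets[0])
--     k = 1
--     while count < total:
--         if k in buckets:
--             levels[k] = buckets[k]
--             count += len(buckets[k])
--             k += 1
--         else:
--             levels[k] = {sid for sid in all_sessions if sid not in seen}
--             break
--     return levels
-- ===== Notes on version B (the rewrite author's own statement) =====
-- stated objective: alternative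
-- what changed: Replaces A's level-synchronous while-loop (which re-reads the previous level out of the result dict and interleaves counting, expansion and the leftover dump) by a single-queue BFS over (session, depth) pairs that buckets discovered sessions by depth, followed by a separate pass that emits the depth buckets while the session count is uncovered and dumps unreached sessions as one final level.
import Mathlib
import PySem

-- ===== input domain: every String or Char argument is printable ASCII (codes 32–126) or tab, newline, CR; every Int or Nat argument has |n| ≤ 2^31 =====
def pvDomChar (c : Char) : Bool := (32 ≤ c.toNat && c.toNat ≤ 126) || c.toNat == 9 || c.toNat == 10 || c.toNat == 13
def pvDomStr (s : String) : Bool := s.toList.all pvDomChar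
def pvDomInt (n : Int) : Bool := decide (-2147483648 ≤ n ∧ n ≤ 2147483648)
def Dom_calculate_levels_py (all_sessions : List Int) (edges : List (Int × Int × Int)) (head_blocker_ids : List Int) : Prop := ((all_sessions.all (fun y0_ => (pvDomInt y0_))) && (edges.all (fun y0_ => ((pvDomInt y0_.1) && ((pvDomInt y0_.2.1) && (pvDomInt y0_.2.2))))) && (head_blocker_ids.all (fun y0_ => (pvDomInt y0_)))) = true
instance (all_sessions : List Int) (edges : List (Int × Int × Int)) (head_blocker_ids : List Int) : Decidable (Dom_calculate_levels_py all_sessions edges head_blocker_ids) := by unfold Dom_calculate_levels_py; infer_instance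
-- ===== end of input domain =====

-- B replaces A's level-synchronous while-loop by a single-queue BFS over (session, depth)
-- pairs plus a separate bucket-emitting pass (alternative decomposition, same cost).

-- ===== PORT A =====
-- inner loop of one while-iteration: `for sid in levels[current_level - 1]: if sid in
-- blocking_map: for blocked_id in blocking_map[sid]: if blocked_id not in assigned: …`;
-- state = (the set levels[current_level] being filled, assigned)
def aExpand (bm : PySem.Dict Int (List Int)) (frontier : List Int)
    (st0 : PySem.Set Int × PySem.Set Int) : PySem.Set Int × PySem.Set Int :=
  frontier.foldl (fun st sid =>
    if bm.contains sid then
      (bm.getD sid []).foldl (fun st c =>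
        if st.2.contains c then st
        else (PySem.Set.add st.1 c, PySem.Set.add st.2 c)) st
    else st) st0

-- `for sid in all_sessions - assigned: levels[current_level].add(sid); assigned.add(sid)`
def aDump (rest : List Int) (st0 : PySem.Set Int × PySem.Set Int) :
    PySem.Set Int × PySem.Set Int :=
  rest.foldl (fun st sid => (PySem.Set.add st.1 sid, PySem.Set.add st.2 sid)) st0

-- the `while len(assigned) < len(all_sessions)` loop; each non-break iteration strictly
-- grows `assigned`, so the loop runs at most `total` times and fuel total+1 never runs out
def aLoop (bm : PySem.Dict Int (List Int)) (allS : List Int) (total : Nat) :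
    Nat → PySem.Dict Int (List Int) → PySem.Set Int → Int → PySem.Dict Int (List Int)
  | 0, levels, _, _ => levels
  | fuel+1, levels, assigned, cur =>
    if assigned.length < total then
      let cur1 := cur + 1
      let frontier := levels.getD (cur1 - 1) []
      let st := aExpand bm frontier ([], assigned)
      let levels1 := levels.insert cur1 st.1
      if st.1.isEmpty then
        -- safety branch: add any remaining sessions, then break
        let rest := PySem.Set.diff (PySem.Set.ofList allS) st.2
        let st2 := aDump rest st
        levels1.insert cur1 st2.1
      else
        aLoop bm allS total fuel levels1 st.2 cur1
    else levels

def calculate_levels_py (all_sessions : List Int) (edges : List (Int × Int × Int)) (head_blocker_ids : List Int) : List (Int × List Int) :=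
  -- levels[0] = head_blocker_ids.copy() if head_blocker_ids else set()
  let level0 : List Int := if head_blocker_ids.isEmpty then [] else head_blocker_ids
  -- if blocker_id not in blocking_map: blocking_map[blocker_id] = []
  -- blocking_map[blocker_id].append(blocked_id)
  let blocking_map : PySem.Dict Int (List Int) := edges.foldl (fun m e =>
      (if m.contains e.1 then m else m.insert e.1 []).modify e.1 [] (fun l => l ++ [e.2.1]))
    PySem.Dict.empty
  let levels : PySem.Dict Int (List Int) := PySem.Dict.empty.insert 0 level0
  let assigned : PySem.Set Int := PySem.Set.ofList level0
  (aLoop blocking_map all_sessions all_sessions.length (all_sessions.length + 1) levels assigned 0).items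

-- ===== PORT B =====
-- adj.setdefault(blocker_id, []).append(blocked_id)
def bAdj (edges : List (Int × Int × Int)) : PySem.Dict Int (List Int) :=
  edges.foldl (fun m e => (m.setdefault e.1 []).modify e.1 [] (fun l => l ++ [e.2.1]))
    PySem.Dict.empty

-- one popped queue entry: `for child in adj.get(sid, ()): if child not in seen:
-- seen.add(child); buckets.setdefault(d+1, set()).add(child); queue.append((child, d+1))`;
-- state = (buckets, seen, children appended to the queue)
def bVisit (adj : PySem.Dict Int (List Int)) (sid : Int) (d : Int)
    (st0 : PySem.Dict Int (List Int) × PySem.Set Int × List (Int × Int)) :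
    PySem.Dict Int (List Int) × PySem.Set Int × List (Int × Int) :=
  (adj.getD sid []).foldl (fun st c =>
    if st.2.1.contains c then st
    else ((st.1.setdefault (d+1) []).modify (d+1) [] (fun l => PySem.Set.add l c),
          PySem.Set.add st.2.1 c, st.2.2 ++ [(c, d+1)])) st0

-- `while i < len(queue)`: the unprocessed suffix queue[i:] is the first argument; each
-- iteration pops exactly one entry, so any bound on the final queue length works as fuel
def bBfs (adj : PySem.Dict Int (List Int)) :
    Nat → List (Int × Int) → PySem.Dict Int (List Int) → PySem.Set Int →
    PySem.Dict Int (List Int) × PySem.Set Int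
  | 0, _, buckets, seen => (buckets, seen)
  | _+1, [], buckets, seen => (buckets, seen)
  | fuel+1, (sid, d) :: pending, buckets, seen =>
    let st := bVisit adj sid d (buckets, seen, [])
    bBfs adj fuel (pending ++ st.2.2) st.1 st.2.1

-- `while count < total: if k in buckets: … else: dump; break` (runs ≤ total iterations)
def bTrunc (allS : List Int) (seen : PySem.Set Int) (buckets : PySem.Dict Int (List Int))
    (total : Nat) :
    Nat → PySem.Dict Int (List Int) → Nat → Int → PySem.Dict Int (List Int)
  | 0, levels, _, _ => levels
  | fuel+1, levels, count, k =>
    if count < total then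
      if buckets.contains k then
        bTrunc allS seen buckets total fuel (levels.insert k (buckets.getD k []))
          (count + (buckets.getD k []).length) (k+1)
      else
        levels.insert k (PySem.Set.ofList (allS.filter (fun sid => !(PySem.Set.contains seen sid))))
    else levels

def calculate_levels_py_alt (all_sessions : List Int) (edges : List (Int × Int × Int)) (head_blocker_ids : List Int) : List (Int × List Int) :=
  let adj := bAdj edges
  let buckets0 : PySem.Dict Int (List Int) :=
    PySem.Dict.empty.insert 0 (PySem.Set.ofList head_blocker_ids)
  let seen0 : PySem.Set Int := PySem.Set.ofList head_blocker_ids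
  let queue0 : List (Int × Int) := head_blocker_ids.map (fun sid => (sid, 0))
  let r := bBfs adj (head_blocker_ids.length + edges.length + 1) queue0 buckets0 seen0
  let total := all_sessions.length
  let levels0 : PySem.Dict Int (List Int) := PySem.Dict.empty.insert 0 (r.1.getD 0 [])
  (bTrunc all_sessions r.2 r.1 total (total + 1) levels0 (r.1.getD 0 []).length 1).items

-- ===== PRECONDITION & SPEC =====
-- all_sessions and head_blocker_ids are Python SETS; Pre_ only states that their list
-- encodings hold distinct elements, as the set-to-list type convention guarantees, so no
-- input the Python function can actually receive is excluded.
def Pre_calculate_levels_py (all_sessions : List Int) (edges : List (Int × Int × Int)) (head_blocker_ids : List Int) : Prop :=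
  all_sessions.Nodup ∧ head_blocker_ids.Nodup
instance (all_sessions : List Int) (edges : List (Int × Int × Int)) (head_blocker_ids : List Int) : Decidable (Pre_calculate_levels_py all_sessions edges head_blocker_ids) := by unfold Pre_calculate_levels_py; infer_instance
def pvWitness_calculate_levels_py : List Int × (List (Int × Int × Int)) × List Int :=
  ([1, 2, 3, 4], [(1, 2, 0), (2, 3, 0)], [1])
def Spec_calculate_levels_py (all_sessions : List Int) (edges : List (Int × Int × Int)) (head_blocker_ids : List Int) (out : List (Int × List Int)) : Prop := out = calculate_levels_py_alt all_sessions edges head_blocker_ids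
instance (all_sessions : List Int) (edges : List (Int × Int × Int)) (head_blocker_ids : List Int) (out : List (Int × List Int)) : Decidable (Spec_calculate_levels_py all_sessions edges head_blocker_ids out) := by unfold Spec_calculate_levels_py; infer_instance

-- ===== CLAIM (what is proved, stated in full; the proofs are below) =====
def Claim_equal_calculate_levels_py : Prop := ∀ (all_sessions : List Int) (edges : List (Int × Int × Int)) (head_blocker_ids : List Int), Dom_calculate_levels_py all_sessions edges head_blocker_ids → Pre_calculate_levels_py all_sessions edges head_blocker_ids → Spec_calculate_levels_py all_sessions edges head_blocker_ids (calculate_levels_py all_sessions edges head_blocker_ids)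

-- ===== LEMMAS AND PROOFS =====

set_option maxHeartbeats 1000000

-- contains / membership bridge
lemma pv_contains_true (l : List Int) (x : Int) : l.contains x = true ↔ x ∈ l := by simp

lemma pv_set_contains (s : PySem.Set Int) (x : Int) :
    PySem.Set.contains s x = List.contains s x := rfl

lemma pv_scontains_true (s : PySem.Set Int) (x : Int) :
    PySem.Set.contains s x = true ↔ x ∈ s := by
  rw [pv_set_contains]
  exact pv_contains_true s x

-- Set.add on a fresh element appends
lemma pv_set_add_fresh (s : PySem.Set Int) (x : Int) (h : x ∉ s) :
    PySem.Set.add s x = s ++ [x] := by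
  simp only [PySem.Set.add]
  rw [if_neg]
  simp [h]

-- folding Set.add over fresh distinct elements appends them all
lemma foldl_add_nodup : ∀ (l s : List Int), (s ++ l).Nodup → l.foldl PySem.Set.add s = s ++ l := by
  intro l
  induction l with
  | nil => intro s _; simp
  | cons c l ih =>
    intro s h
    have h' : ((s ++ [c]) ++ l).Nodup := by
      rw [← List.append_cons]
      exact h
    have hc : c ∉ s := by
      rcases List.nodup_append.mp h with ⟨_, _, hdisj⟩
      intro hm
      exact hdisj c hm c List.mem_cons_self rfl
    rw [List.foldl_cons, pv_set_add_fresh s c hc, ih (s ++ [c]) h']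
    rw [← List.append_cons]

lemma ofList_nodup (l : List Int) (h : l.Nodup) : PySem.Set.ofList l = l := by
  have h2 := foldl_add_nodup l [] (by simpa using h)
  simpa [PySem.Set.ofList, PySem.Set.empty] using h2

-- ---- the canonical adjacency map both ports build ----
def adjFold (edges : List (Int × Int × Int)) : PySem.Dict Int (List Int) :=
  edges.foldl (fun m e => m.modify e.1 [] (fun l => l ++ [e.2.1])) PySem.Dict.empty

lemma adj_step (m : PySem.Dict Int (List Int)) (k : Int) (f : List Int → List Int) :
    (if m.contains k then m else m.insert k []).modify k [] f = m.modify k [] f := by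
  split
  · rfl
  · next h =>
    have h' : m.contains k = false := by simpa using h
    simp only [PySem.Dict.modify, PySem.Dict.getD_insert_self, PySem.Dict.insert_insert_self,
      PySem.Dict.getD_of_not_contains m ([] : List Int) h']

lemma a_adj_eq (edges : List (Int × Int × Int)) :
    edges.foldl (fun m e =>
      (if m.contains e.1 then m else m.insert e.1 []).modify e.1 [] (fun l => l ++ [e.2.1]))
      PySem.Dict.empty = adjFold edges := by
  unfold adjFold
  exact PySem.List.foldl_congr_mem _ _ _ _ (fun m e _ => adj_step m e.1 _)

lemma b_adj_eq (edges : List (Int × Int × Int)) : bAdj edges = adjFold edges := by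
  unfold bAdj adjFold
  refine PySem.List.foldl_congr_mem _ _ _ _ (fun m e _ => ?_)
  by_cases h : m.contains e.1 = true
  · rw [PySem.Dict.setdefault_of_contains m ([] : List Int) h]
  · have h' : m.contains e.1 = false := by simpa using h
    rw [PySem.Dict.setdefault_of_not_contains m ([] : List Int) h']
    simp only [PySem.Dict.modify, PySem.Dict.getD_insert_self, PySem.Dict.insert_insert_self,
      PySem.Dict.getD_of_not_contains m ([] : List Int) h']

-- the blocked ids that can ever be discovered
def targets (edges : List (Int × Int × Int)) : List Int := edges.map (fun e => e.2.1)

lemma adj_getD_sub (edges : List (Int × Int × Int)) (k : Int) :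
    ∀ x ∈ (adjFold edges).getD k [], x ∈ targets edges := by
  intro x hx
  have hmap : adjFold edges
      = (edges.map (fun e => (e.1, e.2.1))).foldl
          (fun m p => m.modify p.1 [] (fun l => l ++ [p.2])) PySem.Dict.empty := by
    unfold adjFold
    rw [List.foldl_map]
  rw [hmap, PySem.Dict.getD_foldl_modify_append] at hx
  simp only [PySem.Dict.getD_empty, List.nil_append] at hx
  obtain ⟨p, hp, rfl⟩ := List.mem_map.mp hx
  obtain ⟨e, he, rfl⟩ := List.mem_map.mp (List.mem_of_mem_filter hp)
  exact List.mem_map.mpr ⟨e, he, rfl⟩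

-- ---- canonical one-layer expansion ----
-- the fresh children contributed by one node's adjacency list, given current seen
def newKids (seen : List Int) : List Int → List Int
  | [] => []
  | c :: cs =>
      if PySem.Set.contains seen c then newKids seen cs else c :: newKids (seen ++ [c]) cs

-- the fresh children contributed by a whole frontier (in discovery order)
def newFront (adj : PySem.Dict Int (List Int)) (seen : List Int) : List Int → List Int
  | [] => []
  | sid :: L =>
      let d := newKids seen (adj.getD sid [])
      d ++ newFront adj (seen ++ d) L

lemma newKids_fresh (seen : List Int) (cs : List Int) :
    ∀ x ∈ newKids seen cs, x ∉ seen := by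
  induction cs generalizing seen with
  | nil => simp [newKids]
  | cons c cs ih =>
    intro x hx
    simp only [newKids] at hx
    split at hx
    · exact ih seen x hx
    · next h =>
      have hc : c ∉ seen := fun hm => h ((pv_scontains_true _ _).mpr hm)
      rcases List.mem_cons.mp hx with rfl | hx
      · exact hc
      · intro hs
        exact (ih (seen ++ [c]) x hx) (List.mem_append_left _ hs)

lemma newKids_nodup (seen : List Int) (cs : List Int) : (newKids seen cs).Nodup := by
  induction cs generalizing seen with
  | nil => simp [newKids]
  | cons c cs ih =>
    simp only [newKids]
    split
    · exact ih seen
    · refine List.nodup_cons.mpr ⟨fun hc => ?_, ih (seen ++ [c])⟩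
      exact (newKids_fresh (seen ++ [c]) cs c hc) (List.mem_append_right _ (by simp))

lemma newKids_sub (seen : List Int) (cs : List Int) : ∀ x ∈ newKids seen cs, x ∈ cs := by
  induction cs generalizing seen with
  | nil => simp [newKids]
  | cons c cs ih =>
    intro x hx
    simp only [newKids] at hx
    split at hx
    · exact List.mem_cons_of_mem _ (ih seen x hx)
    · rcases List.mem_cons.mp hx with rfl | hx
      · exact List.mem_cons_self
      · exact List.mem_cons_of_mem _ (ih (seen ++ [c]) x hx)

lemma newFront_fresh (adj : PySem.Dict Int (List Int)) (seen : List Int) (L : List Int) :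
    ∀ x ∈ newFront adj seen L, x ∉ seen := by
  induction L generalizing seen with
  | nil => simp [newFront]
  | cons sid L ih =>
    intro x hx
    simp only [newFront] at hx
    rcases List.mem_append.mp hx with h | h
    · exact newKids_fresh seen _ x h
    · intro hs
      exact ih (seen ++ newKids seen (adj.getD sid [])) x h (List.mem_append_left _ hs)

lemma newFront_nodup (adj : PySem.Dict Int (List Int)) (seen : List Int) (L : List Int) :
    (newFront adj seen L).Nodup := by
  induction L generalizing seen with
  | nil => simp [newFront]
  | cons sid L ih =>
    simp only [newFront]
    refine List.Nodup.append (newKids_nodup seen _) (ih _) ?_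
    intro x hx hy
    exact newFront_fresh adj _ L x hy (List.mem_append_right _ hx)

lemma newFront_sub (edges : List (Int × Int × Int)) (seen : List Int) (L : List Int) :
    ∀ x ∈ newFront (adjFold edges) seen L, x ∈ targets edges := by
  induction L generalizing seen with
  | nil => simp [newFront]
  | cons sid L ih =>
    intro x hx
    simp only [newFront] at hx
    rcases List.mem_append.mp hx with h | h
    · exact adj_getD_sub edges sid x (newKids_sub seen _ x h)
    · exact ih _ x h

-- ---- A's folds compute newFront ----
lemma aKids_eq (cs : List Int) :
    ∀ (a s : PySem.Set Int), (∀ x ∈ a, x ∈ s) →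
    cs.foldl (fun st c =>
        if st.2.contains c then st
        else (PySem.Set.add st.1 c, PySem.Set.add st.2 c)) (a, s)
      = (a ++ newKids s cs, s ++ newKids s cs) := by
  induction cs with
  | nil => intro a s _; simp [newKids]
  | cons c cs ih =>
    intro a s h
    simp only [List.foldl_cons, newKids]
    by_cases hc : PySem.Set.contains s c = true
    · rw [if_pos hc, if_pos hc]
      exact ih a s h
    · have hcm : c ∉ s := fun hm => hc ((pv_scontains_true _ _).mpr hm)
      have hca : c ∉ a := fun hm => hcm (h c hm)
      rw [if_neg hc, if_neg hc]
      rw [pv_set_add_fresh a c hca, pv_set_add_fresh s c hcm]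
      rw [ih (a ++ [c]) (s ++ [c]) (fun x hx => by
        rcases List.mem_append.mp hx with h1 | h1
        · exact List.mem_append_left _ (h x h1)
        · exact List.mem_append_right _ h1)]
      simp [List.append_assoc]

lemma aExpand_eq (bm : PySem.Dict Int (List Int)) (L : List Int) :
    ∀ (a s : PySem.Set Int), (∀ x ∈ a, x ∈ s) →
    aExpand bm L (a, s) = (a ++ newFront bm s L, s ++ newFront bm s L) := by
  induction L with
  | nil => intro a s _; simp [aExpand, newFront]
  | cons sid L ih =>
    intro a s h
    simp only [aExpand, List.foldl_cons, newFront]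
    by_cases hb : bm.contains sid = true
    · rw [if_pos hb]
      rw [aKids_eq _ a s h]
      have h2 : ∀ x ∈ a ++ newKids s (bm.getD sid []), x ∈ s ++ newKids s (bm.getD sid []) := by
        intro x hx
        rcases List.mem_append.mp hx with h1 | h1
        · exact List.mem_append_left _ (h x h1)
        · exact List.mem_append_right _ h1
      have h3 := ih (a ++ newKids s (bm.getD sid [])) (s ++ newKids s (bm.getD sid [])) h2
      simp only [aExpand] at h3
      rw [h3]
      simp [List.append_assoc]
    · have hb' : bm.contains sid = false := by simpa using hb
      rw [if_neg hb]
      rw [PySem.Dict.getD_of_not_contains bm ([] : List Int) hb']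
      simp only [newKids, List.append_nil]
      exact ih a s h

-- ---- B's folds compute newFront ----
-- appending values one at a time at a fixed key
def bAdd (b : PySem.Dict Int (List Int)) (k : Int) (l : List Int) :
    PySem.Dict Int (List Int) :=
  l.foldl (fun b c => b.insert k (b.getD k [] ++ [c])) b

lemma bAdd_eq (b : PySem.Dict Int (List Int)) (k : Int) (l : List Int) (hl : l ≠ []) :
    bAdd b k l = b.insert k (b.getD k [] ++ l) := by
  induction l generalizing b with
  | nil => exact absurd rfl hl
  | cons c l ih =>
    by_cases h : l = []
    · subst h; simp [bAdd]
    · show bAdd (b.insert k (b.getD k [] ++ [c])) k l = _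
      rw [ih _ h]
      rw [PySem.Dict.getD_insert_self, PySem.Dict.insert_insert_self]
      simp [List.append_assoc]

lemma bAdd_getD_self (b : PySem.Dict Int (List Int)) (k : Int) (l : List Int) :
    (bAdd b k l).getD k [] = b.getD k [] ++ l := by
  by_cases h : l = []
  · subst h; simp [bAdd]
  · rw [bAdd_eq b k l h, PySem.Dict.getD_insert_self]

lemma bAdd_append (b : PySem.Dict Int (List Int)) (k : Int) (l1 l2 : List Int) :
    bAdd b k (l1 ++ l2) = bAdd (bAdd b k l1) k l2 := by
  unfold bAdd
  rw [List.foldl_append]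

lemma bKids_eq (d : Int) (cs : List Int) :
    ∀ (buckets : PySem.Dict Int (List Int)) (s : PySem.Set Int) (q : List (Int × Int)),
    (∀ x ∈ buckets.getD (d+1) [], x ∈ s) →
    cs.foldl (fun st c =>
        if st.2.1.contains c then st
        else ((st.1.setdefault (d+1) []).modify (d+1) [] (fun l => PySem.Set.add l c),
              PySem.Set.add st.2.1 c, st.2.2 ++ [(c, d+1)]))
        (buckets, s, q)
      = (bAdd buckets (d+1) (newKids s cs), s ++ newKids s cs,
         q ++ (newKids s cs).map (fun c => (c, d+1))) := by
  induction cs with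
  | nil => intro buckets s q _; simp [newKids, bAdd]
  | cons c cs ih =>
    intro buckets s q h
    simp only [List.foldl_cons, newKids]
    by_cases hc : PySem.Set.contains s c = true
    · rw [if_pos hc, if_pos hc]
      exact ih buckets s q h
    · have hcm : c ∉ s := fun hm => hc ((pv_scontains_true _ _).mpr hm)
      rw [if_neg hc, if_neg hc]
      have hstep : (buckets.setdefault (d+1) []).modify (d+1) [] (fun l => PySem.Set.add l c)
          = buckets.insert (d+1) (buckets.getD (d+1) [] ++ [c]) := by
        by_cases hcont : buckets.contains (d+1) = true
        · rw [PySem.Dict.setdefault_of_contains buckets ([] : List Int) hcont]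
          simp only [PySem.Dict.modify]
          congr 1
          exact pv_set_add_fresh _ c (fun hm => hcm (h c hm))
        · have hcont' : buckets.contains (d+1) = false := by simpa using hcont
          rw [PySem.Dict.setdefault_of_not_contains buckets ([] : List Int) hcont']
          simp only [PySem.Dict.modify, PySem.Dict.getD_insert_self,
            PySem.Dict.insert_insert_self, PySem.Dict.getD_of_not_contains buckets ([] : List Int) hcont']
          rfl
      rw [hstep, pv_set_add_fresh s c hcm]
      have hsub2 : ∀ x ∈ (buckets.insert (d+1) (buckets.getD (d+1) [] ++ [c])).getD (d+1) [],
          x ∈ s ++ [c] := by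
        rw [PySem.Dict.getD_insert_self]
        intro x hx
        rcases List.mem_append.mp hx with h1 | h1
        · exact List.mem_append_left _ (h x h1)
        · exact List.mem_append_right _ h1
      rw [ih _ _ _ hsub2]
      simp only [Prod.mk.injEq]
      refine ⟨rfl, ?_, ?_⟩ <;> simp [List.append_assoc]

lemma bVisit_eq (adj : PySem.Dict Int (List Int)) (sid d : Int)
    (buckets : PySem.Dict Int (List Int)) (s : PySem.Set Int) (q : List (Int × Int))
    (hsub : ∀ x ∈ buckets.getD (d+1) [], x ∈ s) :
    bVisit adj sid d (buckets, s, q) =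
      (bAdd buckets (d+1) (newKids s (adj.getD sid [])),
       s ++ newKids s (adj.getD sid []),
       q ++ (newKids s (adj.getD sid [])).map (fun c => (c, d+1))) :=
  bKids_eq d (adj.getD sid []) buckets s q hsub

lemma bBfs_nil (adj : PySem.Dict Int (List Int)) (fuel : Nat)
    (b : PySem.Dict Int (List Int)) (s : PySem.Set Int) :
    bBfs adj fuel [] b s = (b, s) := by
  cases fuel <;> rfl

-- processing a block of same-depth queue entries = one newFront expansion
lemma bBfs_peel (adj : PySem.Dict Int (List Int)) (d : Int) :
    ∀ (L : List Int) (rest : List (Int × Int)) (buckets : PySem.Dict Int (List Int))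
      (s : PySem.Set Int) (fuel : Nat),
      (∀ x ∈ buckets.getD (d+1) [], x ∈ s) →
      bBfs adj (L.length + fuel) (L.map (fun sid => (sid, d)) ++ rest) buckets s =
        bBfs adj fuel (rest ++ (newFront adj s L).map (fun c => (c, d+1)))
          (bAdd buckets (d+1) (newFront adj s L)) (s ++ newFront adj s L) := by
  intro L
  induction L with
  | nil => intro rest buckets s fuel _; simp [newFront, bAdd]
  | cons sid L ih =>
    intro rest buckets s fuel hsub
    have hlen : (sid :: L).length + fuel = (L.length + fuel) + 1 := by
      simp only [List.length_cons]
      omega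
    rw [hlen]
    simp only [List.map_cons, List.cons_append]
    have hunf : bBfs adj ((L.length + fuel) + 1)
        ((sid, d) :: (L.map (fun sid => (sid, d)) ++ rest)) buckets s
        = bBfs adj (L.length + fuel)
            ((L.map (fun sid => (sid, d)) ++ rest) ++ (bVisit adj sid d (buckets, s, [])).2.2)
            (bVisit adj sid d (buckets, s, [])).1 (bVisit adj sid d (buckets, s, [])).2.1 := rfl
    rw [hunf, bVisit_eq adj sid d buckets s [] hsub]
    simp only [List.nil_append, List.append_assoc]
    rw [ih (rest ++ (newKids s (adj.getD sid [])).map (fun c => (c, d+1)))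
        (bAdd buckets (d+1) (newKids s (adj.getD sid []))) (s ++ newKids s (adj.getD sid []))
        fuel
        (by
          intro x hx
          rw [bAdd_getD_self] at hx
          rcases List.mem_append.mp hx with h1 | h1
          · exact List.mem_append_left _ (hsub x h1)
          · exact List.mem_append_right _ h1)]
    simp only [newFront, ← bAdd_append, List.map_append, List.append_assoc]

-- ---- the layer stream ----
def unseenCnt (edges : List (Int × Int × Int)) (seen : List Int) : Nat :=
  ((targets edges).dedup.filter (fun x => decide (x ∉ seen))).length

lemma unseenCnt_le (edges : List (Int × Int × Int)) (seen : List Int) :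
    unseenCnt edges seen ≤ edges.length := by
  unfold unseenCnt
  calc ((targets edges).dedup.filter (fun x => decide (x ∉ seen))).length
      ≤ (targets edges).dedup.length := List.length_filter_le _ _
    _ ≤ (targets edges).length := (List.dedup_sublist _).length_le
    _ = edges.length := by simp [targets]

lemma unseenCnt_drop_one (edges : List (Int × Int × Int)) (seen : List Int) (c : Int)
    (hfresh : c ∉ seen) (hsub : c ∈ targets edges) :
    unseenCnt edges (seen ++ [c]) + 1 = unseenCnt edges seen := by
  unfold unseenCnt
  have hsplit : (targets edges).dedup.filter (fun x => decide (x ∉ seen ++ [c]))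
      = ((targets edges).dedup.filter (fun x => decide (x ∉ seen))).filter
          (fun x => x != c) := by
    rw [List.filter_filter]
    apply List.filter_congr
    intro x _
    by_cases h1 : x ∈ seen <;> by_cases h2 : x = c <;> simp [h1, h2]
  rw [hsplit]
  set F := (targets edges).dedup.filter (fun x => decide (x ∉ seen)) with hF
  have hFnd : F.Nodup := (List.nodup_dedup _).filter _
  have hcF : c ∈ F := by
    rw [hF]
    refine List.mem_filter.mpr ⟨List.mem_dedup.mpr hsub, by simpa using hfresh⟩
  have herase : F.filter (fun x => x != c) = F.erase c :=
    (List.Nodup.erase_eq_filter hFnd c).symm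
  rw [herase, List.length_erase_of_mem hcF]
  have hpos : 0 < F.length := List.length_pos_of_mem hcF
  omega

lemma unseenCnt_drop (edges : List (Int × Int × Int)) :
    ∀ (δ seen : List Int), (∀ x ∈ δ, x ∉ seen) → δ.Nodup → (∀ x ∈ δ, x ∈ targets edges) →
    unseenCnt edges (seen ++ δ) + δ.length = unseenCnt edges seen := by
  intro δ
  induction δ with
  | nil => intro seen _ _ _; simp
  | cons c δ ih =>
    intro seen hfresh hnd hsub
    have h1 : unseenCnt edges ((seen ++ [c]) ++ δ) + δ.length = unseenCnt edges (seen ++ [c]) := by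
      refine ih (seen ++ [c]) (fun x hx => ?_) (List.nodup_cons.mp hnd).2
        (fun x hx => hsub x (List.mem_cons_of_mem _ hx))
      intro hm
      rcases List.mem_append.mp hm with h | h
      · exact hfresh x (List.mem_cons_of_mem _ hx) h
      · have hxc : x = c := by simpa using h
        exact (List.nodup_cons.mp hnd).1 (hxc ▸ hx)
    have h2 := unseenCnt_drop_one edges seen c (hfresh c List.mem_cons_self)
      (hsub c List.mem_cons_self)
    have h3 : seen ++ c :: δ = (seen ++ [c]) ++ δ := by simp
    rw [h3]
    simp only [List.length_cons]
    omega

def stream (edges : List (Int × Int × Int)) (L seen : List Int) :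
    List (List Int) × List Int :=
  let δ := newFront (adjFold edges) seen L
  if _h : δ = [] then ([], seen)
  else
    let r := stream edges δ (seen ++ δ)
    (δ :: r.1, r.2)
termination_by unseenCnt edges seen
decreasing_by
  have h1 := newFront_fresh (adjFold edges) seen L
  have h2 := newFront_nodup (adjFold edges) seen L
  have h3 := newFront_sub edges seen L
  have h4 := unseenCnt_drop edges (newFront (adjFold edges) seen L) seen h1 h2 h3
  have hlen : 0 < (newFront (adjFold edges) seen L).length := List.length_pos_of_ne_nil _h
  omega

lemma stream_eq (edges : List (Int × Int × Int)) (L seen : List Int) :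
    stream edges L seen =
      (if newFront (adjFold edges) seen L = [] then ([], seen)
       else (newFront (adjFold edges) seen L ::
              (stream edges (newFront (adjFold edges) seen L)
                (seen ++ newFront (adjFold edges) seen L)).1,
             (stream edges (newFront (adjFold edges) seen L)
               (seen ++ newFront (adjFold edges) seen L)).2)) := by
  rw [stream]
  split <;> simp_all

-- ---- bBfs computes the stream, bucketed by depth ----
def emitB (b : PySem.Dict Int (List Int)) (k : Int) :
    List (List Int) → PySem.Dict Int (List Int)
  | [] => b
  | l :: ls => emitB (b.insert k l) (k+1) ls

lemma bBfs_char (edges : List (Int × Int × Int)) :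
    ∀ (fuel : Nat) (L : List Int) (s : PySem.Set Int)
      (buckets : PySem.Dict Int (List Int)) (d : Int),
      unseenCnt edges s + L.length ≤ fuel →
      (∀ j : Int, d + 1 ≤ j → buckets.contains j = false) →
      bBfs (adjFold edges) fuel (L.map (fun sid => (sid, d))) buckets s =
        (emitB buckets (d+1) (stream edges L s).1, (stream edges L s).2) := by
  intro fuel
  induction fuel using Nat.strong_induction_on with
  | _ fuel IH =>
    intro L s buckets d hfuel hfresh
    have hgd : buckets.getD (d+1) [] = [] :=
      PySem.Dict.getD_of_not_contains buckets ([] : List Int) (hfresh (d+1) le_rfl)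
    have hsub : ∀ x ∈ buckets.getD (d+1) [], x ∈ s := by rw [hgd]; simp
    have hfe : L.length + (fuel - L.length) = fuel := by omega
    have hpeel := bBfs_peel (adjFold edges) d L [] buckets s (fuel - L.length) hsub
    rw [List.append_nil, List.nil_append] at hpeel
    rw [stream_eq]
    by_cases hd : newFront (adjFold edges) s L = []
    · rw [← hfe, hpeel, hd]
      simp [bBfs_nil, bAdd, emitB]
    · rw [← hfe, hpeel]
      rw [if_neg hd]
      have hfr := newFront_fresh (adjFold edges) s L
      have hnd := newFront_nodup (adjFold edges) s L
      have hsb := newFront_sub edges s L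
      have hdrop := unseenCnt_drop edges (newFront (adjFold edges) s L) s hfr hnd hsb
      have hLne : L ≠ [] := by
        intro h
        apply hd
        rw [h]
        rfl
      have hL1 : 0 < L.length := List.length_pos_of_ne_nil hLne
      have hd1 : 0 < (newFront (adjFold edges) s L).length := List.length_pos_of_ne_nil hd
      have hb' : bAdd buckets (d+1) (newFront (adjFold edges) s L)
          = buckets.insert (d+1) (newFront (adjFold edges) s L) := by
        rw [bAdd_eq _ _ _ hd, hgd, List.nil_append]
      rw [hb']
      have hrec := IH (fuel - L.length) (by omega) (newFront (adjFold edges) s L)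
        (s ++ newFront (adjFold edges) s L)
        (buckets.insert (d+1) (newFront (adjFold edges) s L)) (d+1)
        (by omega)
        (by
          intro j hj
          rw [PySem.Dict.contains_insert]
          have hne : (j == (d+1)) = false := by
            simp only [beq_eq_false_iff_ne, ne_eq]
            omega
          rw [hne, Bool.false_or]
          exact hfresh j (by omega))
      rw [hrec]
      rfl

lemma emitB_get?_lt (b : PySem.Dict Int (List Int)) (k j : Int) (ls : List (List Int))
    (h : j < k) : (emitB b k ls).get? j = b.get? j := by
  induction ls generalizing b k with
  | nil => rfl
  | cons l ls ih =>
    show (emitB (b.insert k l) (k+1) ls).get? j = _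
    rw [ih (b.insert k l) (k+1) (by omega)]
    exact PySem.Dict.get?_insert_of_ne _ _ (by omega)

lemma emitB_get?_ge (b : PySem.Dict Int (List Int)) (k j : Int) (ls : List (List Int))
    (hk : k ≤ j) (hb : ∀ i : Int, k ≤ i → b.contains i = false) :
    (emitB b k ls).get? j = ls[(j - k).toNat]? := by
  induction ls generalizing b k with
  | nil =>
    show b.get? j = _
    simp only [List.getElem?_nil]
    exact (PySem.Dict.get?_eq_none_iff_contains _ _).mpr (hb j hk)
  | cons l ls ih =>
    by_cases hj : j = k
    · subst hj
      show (emitB (b.insert j l) (j+1) ls).get? j = _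
      rw [emitB_get?_lt _ _ _ _ (by omega), PySem.Dict.get?_insert_self]
      have h0 : (j - j).toNat = 0 := by omega
      rw [h0]
      rfl
    · have hlt : k < j := lt_of_le_of_ne hk (Ne.symm hj)
      show (emitB (b.insert k l) (k+1) ls).get? j = _
      rw [ih (b.insert k l) (k+1) (by omega)
        (by
          intro i hi
          rw [PySem.Dict.contains_insert]
          have hne : (i == k) = false := by
            simp only [beq_eq_false_iff_ne, ne_eq]
            omega
          rw [hne, Bool.false_or]
          exact hb i (by omega))]
      have harith : (j - k).toNat = (j - (k+1)).toNat + 1 := by omega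
      rw [harith]
      rfl

-- ---- the grand simulation: A's fused loop = B's bucket-emitting pass ----
lemma sim (edges : List (Int × Int × Int)) (allS : List Int) (hA : allS.Nodup)
    (bucketsF : PySem.Dict Int (List Int)) (sF : PySem.Set Int) :
    ∀ (ls : List (List Int)) (fuelA fuelT : Nat) (k : Int)
      (levels : PySem.Dict Int (List Int)) (seen : PySem.Set Int) (L : List Int)
      (count : Nat),
      stream edges L seen = (ls, sF) →
      levels.getD (k - 1) [] = L →
      (∀ j : Int, k ≤ j → bucketsF.get? j = ls[(j - k).toNat]?) →
      count = seen.length →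
      allS.length - count < fuelA → allS.length - count < fuelT →
      aLoop (adjFold edges) allS allS.length fuelA levels seen (k - 1) =
        bTrunc allS sF bucketsF allS.length fuelT levels count k := by
  intro ls
  induction ls with
  | nil =>
    intro fuelA fuelT k levels seen L count hs hfr hlk hcount hfA hfT
    rw [stream_eq] at hs
    by_cases hd : newFront (adjFold edges) seen L = []
    · rw [if_pos hd, Prod.mk.injEq] at hs
      have hsF : sF = seen := hs.2.symm
      subst hcount
      cases fuelA with
      | zero => omega
      | succ fA =>
        cases fuelT with
        | zero => omega
        | succ fT =>
          simp only [aLoop, bTrunc]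
          by_cases hlt : seen.length < allS.length
          · rw [if_pos hlt, if_pos hlt]
            -- B side: key k is not in the buckets
            have hcontk : bucketsF.contains k = false := by
              rw [PySem.Dict.contains_eq_isSome_get?, hlk k le_rfl]
              simp
            rw [hcontk]
            simp only [Bool.false_eq_true, if_false]
            -- A side: the expansion is empty, the dump branch fires
            have hk1 : k - 1 + 1 = k := by ring
            rw [hk1, hfr]
            rw [aExpand_eq (adjFold edges) L [] seen (by simp)]
            rw [hd]
            simp only [List.append_nil, List.isEmpty_nil, reduceIte]
            rw [PySem.Dict.insert_insert_self]
            -- both dumps are the same filtered list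
            have hrest : PySem.Set.diff (PySem.Set.ofList allS) seen
                = allS.filter (fun x => !seen.contains x) := by
              rw [ofList_nodup allS hA]
              rfl
            have hrnd : (allS.filter (fun x => !seen.contains x)).Nodup := hA.filter _
            have hdump : (aDump (PySem.Set.diff (PySem.Set.ofList allS) seen) ([], seen)).1
                = allS.filter (fun x => !seen.contains x) := by
              unfold aDump
              rw [PySem.List.foldl_prod_mk (f := fun acc e => PySem.Set.add acc e)
                (g := fun acc e => PySem.Set.add acc e)]
              rw [hrest]
              have hfold := foldl_add_nodup (allS.filter (fun x => !seen.contains x)) []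
                (by simpa using hrnd)
              simpa using hfold
            rw [hdump]
            rw [hsF]
            have hset : (PySem.Set.ofList (allS.filter (fun sid => !(PySem.Set.contains seen sid))))
                = allS.filter (fun x => !seen.contains x) :=
              ofList_nodup _ hrnd
            rw [hset]
          · rw [if_neg hlt, if_neg hlt]
    · rw [if_neg hd, Prod.mk.injEq] at hs
      exact absurd hs.1 (List.cons_ne_nil _ _)
  | cons d0 ls1 ih =>
    intro fuelA fuelT k levels seen L count hs hfr hlk hcount hfA hfT
    rw [stream_eq] at hs
    by_cases hd : newFront (adjFold edges) seen L = []
    · rw [if_pos hd, Prod.mk.injEq] at hs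
      exact absurd hs.1.symm (List.cons_ne_nil _ _)
    · rw [if_neg hd, Prod.mk.injEq, List.cons.injEq] at hs
      have hd0 : d0 = newFront (adjFold edges) seen L := hs.1.1.symm
      have hls1 : (stream edges (newFront (adjFold edges) seen L)
          (seen ++ newFront (adjFold edges) seen L)).1 = ls1 := hs.1.2
      have hsnd : (stream edges (newFront (adjFold edges) seen L)
          (seen ++ newFront (adjFold edges) seen L)).2 = sF := hs.2
      subst hcount
      cases fuelA with
      | zero => omega
      | succ fA =>
        cases fuelT with
        | zero => omega
        | succ fT =>
          simp only [aLoop, bTrunc]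
          have hd1 : 0 < (newFront (adjFold edges) seen L).length :=
            List.length_pos_of_ne_nil hd
          by_cases hlt : seen.length < allS.length
          · rw [if_pos hlt, if_pos hlt]
            -- B side: key k maps to layer d0
            have hgetk : bucketsF.get? k = some d0 := by
              rw [hlk k le_rfl]
              have h0 : (k - k).toNat = 0 := by omega
              rw [h0]
              rfl
            have hcontk : bucketsF.contains k = true := by
              rw [PySem.Dict.contains_eq_isSome_get?, hgetk]
              rfl
            have hgDk : bucketsF.getD k [] = d0 :=
              PySem.Dict.getD_of_get?_eq_some _ _ hgetk
            rw [hcontk]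
            simp only [if_true, hgDk]
            -- A side: nonempty expansion, recurse
            have hk1 : k - 1 + 1 = k := by ring
            rw [hk1, hfr]
            rw [aExpand_eq (adjFold edges) L [] seen (by simp)]
            simp only [List.nil_append]
            have hne : (newFront (adjFold edges) seen L).isEmpty = false := by
              rw [Bool.eq_false_iff]
              intro hemp
              exact hd (List.isEmpty_iff.mp hemp)
            rw [hne]
            simp only [Bool.false_eq_true, if_false]
            rw [← hd0]
            -- apply the induction hypothesis at k+1
            have hrec := ih fA fT (k+1) (levels.insert k d0)
              (seen ++ d0) d0 (seen.length + d0.length)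
              (by rw [hd0, ← hls1, ← hsnd])
              (by
                have hk2 : k + 1 - 1 = k := by ring
                rw [hk2]
                exact PySem.Dict.getD_insert_self _ _ _ _)
              (by
                intro j hj
                rw [hlk j (by omega)]
                have harith : (j - k).toNat = (j - (k+1)).toNat + 1 := by omega
                rw [harith]
                rfl)
              (by simp)
              (by rw [hd0]; omega)
              (by rw [hd0]; omega)
            have hk2 : k + 1 - 1 = k := by ring
            rw [hk2] at hrec
            rw [hd0] at hrec ⊢
            exact hrec
          · rw [if_neg hlt, if_neg hlt]

-- ===== VERDICT (by name: the statement is the Claim_ definition above) =====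
theorem calculate_levels_py_spec : Claim_equal_calculate_levels_py := by
  intro allS edges heads _ hpre
  obtain ⟨hA, hH⟩ := hpre
  unfold Spec_calculate_levels_py calculate_levels_py calculate_levels_py_alt
  have hl0 : (if heads.isEmpty then ([] : List Int) else heads) = heads := by
    by_cases h : heads.isEmpty = true
    · rw [if_pos h]
      exact (List.isEmpty_iff.mp h).symm
    · rw [if_neg h]
  simp only [hl0, a_adj_eq, b_adj_eq, ofList_nodup heads hH]
  have hchar := bBfs_char edges (heads.length + edges.length + 1) heads heads
    (PySem.Dict.empty.insert 0 heads) 0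
    (by have := unseenCnt_le edges heads; omega)
    (by
      intro j hj
      rw [PySem.Dict.contains_insert]
      have hne : (j == (0 : Int)) = false := by
        simp only [beq_eq_false_iff_ne, ne_eq]
        omega
      rw [hne, Bool.false_or]
      exact PySem.Dict.contains_empty _)
  simp only [zero_add] at hchar
  rw [hchar]
  have hget0 : (emitB (PySem.Dict.empty.insert 0 heads) 1 (stream edges heads heads).1).getD 0 []
      = heads := by
    rw [PySem.Dict.getD_eq_get?_getD, emitB_get?_lt _ _ _ _ (by omega),
      PySem.Dict.get?_insert_self]
    rfl
  simp only [hget0]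
  have hsim := sim edges allS hA
    (emitB (PySem.Dict.empty.insert 0 heads) 1 (stream edges heads heads).1)
    (stream edges heads heads).2
    (stream edges heads heads).1 (allS.length + 1) (allS.length + 1) 1
    (PySem.Dict.empty.insert 0 heads) heads heads heads.length
    rfl
    (by
      have h0 : (1 : Int) - 1 = 0 := by ring
      rw [h0]
      exact PySem.Dict.getD_insert_self _ _ _ _)
    (by
      intro j hj
      exact emitB_get?_ge _ 1 j _ hj (by
        intro i hi
        rw [PySem.Dict.contains_insert]
        have hne : (i == (0 : Int)) = false := by
          simp only [beq_eq_false_iff_ne, ne_eq]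
          omega
        rw [hne, Bool.false_or]
        exact PySem.Dict.contains_empty _))
    rfl (by omega) (by omega)
  have h0 : (1 : Int) - 1 = 0 := by ring
  rw [h0] at hsim
  exact congrArg PySem.Dict.items hsim
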